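-- pv_equiv track=rewrite | github.com/keigotak/JapanesePASAasaSequencePointingTask | src/pytorch/SimilarlityBERTrawPN.py | get_aggregated_label
-- ===== SOURCE A (Python) =====
-- def get_aggregated_label(tokens, labels):
--     aggregated_labels = []
--     offsets, current = [], 0
--     for t in tokens:
--         offsets.append((current, current + len(t)))
--         current += len(t)
--
--     for offset in offsets:
--         aggregated_labels.append(0)
--         items = set(labels[offset[0]: offset[1]])
--         if 1 in items:
--             aggregated_labels[-1] = 1
--     return aggregated_labels
-- ===== SOURCE B (Python) =====
-- def get_aggregated_label(tokens, labels):
--     # prefix[i] = number of 1-labels among labels[:i]; each token is an O(1) range query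
--     prefix = [0]
--     for x in labels:
--         prefix.append(prefix[-1] + (1 if x == 1 else 0))
--     L = len(labels)
--     out = []
--     pos = 0
--     for t in tokens:
--         end = pos + len(t)
--         out.append(1 if prefix[min(end, L)] - prefix[min(pos, L)] > 0 else 0)
--         pos = end
--     return out
-- ===== Notes on version B (the rewrite author's own statement) =====
-- stated objective: alternative
-- what changed: Replaces per-token slicing plus set construction and membership test with a precomputed prefix-count array queried in O(1) per token.
import Mathlib
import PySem

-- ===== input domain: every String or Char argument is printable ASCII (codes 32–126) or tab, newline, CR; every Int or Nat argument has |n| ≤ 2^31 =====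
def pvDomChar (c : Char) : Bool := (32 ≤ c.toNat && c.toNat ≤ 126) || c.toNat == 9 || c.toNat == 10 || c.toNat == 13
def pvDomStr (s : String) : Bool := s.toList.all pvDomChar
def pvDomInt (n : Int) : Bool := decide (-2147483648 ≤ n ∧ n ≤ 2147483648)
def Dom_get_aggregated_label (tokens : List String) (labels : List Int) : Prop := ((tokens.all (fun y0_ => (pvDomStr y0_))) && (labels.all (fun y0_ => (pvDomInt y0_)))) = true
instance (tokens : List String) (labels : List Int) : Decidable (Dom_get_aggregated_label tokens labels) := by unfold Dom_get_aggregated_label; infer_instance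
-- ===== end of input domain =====

-- B replaces A's per-token slice/set/membership scan with a prefix-count array and O(1) range queries (alternative decomposition).

-- ===== PORT A =====
-- len(t) is ported as t.toList.length (exact: Python's len on str counts code points).
def get_aggregated_label (tokens : List String) (labels : List Int) : List Int :=
  let st := tokens.foldl
    (fun (st : List (Int × Int) × Int) t =>
      (st.1 ++ [(st.2, st.2 + (t.toList.length : Int))], st.2 + (t.toList.length : Int)))
    ([], 0)
  st.1.foldl
    (fun acc offset =>
      let acc2 := acc ++ [(0 : Int)]
      let items : PySem.Set Int :=
        PySem.Set.ofList (PySem.List.slice labels (some offset.1) (some offset.2))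
      if (1 : Int) ∈ items then acc2.dropLast ++ [(1 : Int)] else acc2)
    []

-- ===== PORT B =====
-- prefix[-1] is ported as getLastD 0 (exact: the prefix list is never empty);
-- indices min end L / min pos L are always in range, ported as getD.
def get_aggregated_label_alt (tokens : List String) (labels : List Int) : List Int :=
  let pref : List Int :=
    labels.foldl (fun p x => p ++ [p.getLastD 0 + (if x = 1 then 1 else 0)]) [0]
  let L := labels.length
  let st := tokens.foldl
    (fun (st : List Int × Nat) t =>
      let e := st.2 + t.toList.length
      (st.1 ++ [if pref.getD (min e L) 0 - pref.getD (min st.2 L) 0 > 0 then (1 : Int) else 0], e))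
    ([], 0)
  st.1

-- ===== PRECONDITION & SPEC =====
def Spec_get_aggregated_label (tokens : List String) (labels : List Int) (out : List Int) : Prop := out = get_aggregated_label_alt tokens labels
instance (tokens : List String) (labels : List Int) (out : List Int) : Decidable (Spec_get_aggregated_label tokens labels out) := by unfold Spec_get_aggregated_label; infer_instance

-- ===== CLAIM (what is proved, stated in full; the proofs are below) =====
def Claim_equal_get_aggregated_label : Prop := ∀ (tokens : List String) (labels : List Int), Dom_get_aggregated_label tokens labels → Spec_get_aggregated_label tokens labels (get_aggregated_label tokens labels)

-- ===== LEMMAS AND PROOFS =====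

-- running prefix sums: scan1 a ls = the partial counts starting from a
def scan1 : Int → List Int → List Int
  | _, [] => []
  | a, x :: xs => (a + (if x = 1 then 1 else 0)) :: scan1 (a + (if x = 1 then 1 else 0)) xs

theorem foldl_prefix_eq_scan1 (ls : List Int) :
    ∀ (p : List Int) (a : Int), p.getLast?.getD 0 = a →
    ls.foldl (fun p x => p ++ [p.getLastD 0 + (if x = 1 then 1 else 0)]) p = p ++ scan1 a ls := by
  induction ls with
  | nil => intro p a _; simp [scan1]
  | cons x xs ih =>
    intro p a ha
    simp only [List.foldl_cons, scan1]
    rw [ih (p ++ [p.getLastD 0 + (if x = 1 then 1 else 0)]) (a + (if x = 1 then 1 else 0))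
      (by simp [List.getLastD_eq_getLast?, ha])]
    simp [List.getLastD_eq_getLast?, ha]

theorem scan1_getD (ls : List Int) :
    ∀ (a : Int) (i : Nat), i ≤ ls.length →
    (a :: scan1 a ls).getD i 0 = a + ((ls.take i).count 1 : Int) := by
  induction ls with
  | nil =>
    intro a i h
    cases i with
    | zero => simp
    | succ j => simp at h
  | cons x xs ih =>
    intro a i h
    cases i with
    | zero => simp
    | succ j =>
      simp only [scan1, List.getD_cons_succ, List.take_succ_cons, List.count_cons]
      rw [ih (a + (if x = 1 then 1 else 0)) j (by simpa using h)]
      by_cases hx : x = 1 <;> simp [hx] <;> ring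

-- the value B reads at a (clamped) index i of its prefix array
theorem pref_getD (labels : List Int) (i : Nat) :
    (labels.foldl (fun p x => p ++ [p.getLastD 0 + (if x = 1 then 1 else 0)]) [0]).getD
      (min i labels.length) 0 = ((labels.take i).count 1 : Int) := by
  rw [foldl_prefix_eq_scan1 labels [0] 0 (by simp)]
  have h1 : ([(0:Int)] ++ scan1 0 labels) = (0 : Int) :: scan1 0 labels := by simp
  rw [h1, scan1_getD labels 0 (min i labels.length) (Nat.min_le_right _ _)]
  have : labels.take (min i labels.length) = labels.take i := by
    rcases Nat.le_total i labels.length with h | h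
    · rw [Nat.min_eq_left h]
    · rw [Nat.min_eq_right h, List.take_length, List.take_of_length_le h]
  simp [this]

-- pointwise: A's slice/set membership test equals B's prefix-difference test
theorem pointwise (labels : List Int) (pos n : Nat) :
    (if (1 : Int) ∈ PySem.Set.ofList
        (PySem.List.slice labels (some (pos : Int)) (some ((pos : Int) + (n : Int))))
      then (1 : Int) else 0)
    = (if ((labels.take (pos + n)).count 1 : Int) - ((labels.take pos).count 1 : Int) > 0
      then (1 : Int) else 0) := by
  rw [PySem.List.slice_natCast_add]
  have hmem : ((1 : Int) ∈ PySem.Set.ofList ((labels.drop pos).take n)) ↔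
      (1 : Int) ∈ (labels.drop pos).take n := PySem.Set.mem_ofList _ _
  have hsplit : labels.take (pos + n) = labels.take pos ++ (labels.drop pos).take n :=
    List.take_add ..
  rw [hsplit, List.count_append]
  by_cases h : (1 : Int) ∈ (labels.drop pos).take n
  · have : 0 < ((labels.drop pos).take n).count 1 := List.count_pos_iff.mpr h
    rw [if_pos (hmem.mpr h), if_pos (by push_cast; omega)]
  · have : ((labels.drop pos).take n).count 1 = 0 := by
      simpa [List.count_eq_zero] using h
    rw [if_neg (fun hc => h (hmem.mp hc)), if_neg (by push_cast; omega)]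

-- offsets A builds starting at position c
def offsOf : Int → List String → List (Int × Int)
  | _, [] => []
  | c, t :: ts => (c, c + (t.toList.length : Int)) :: offsOf (c + (t.toList.length : Int)) ts

theorem foldl_offsets (tokens : List String) :
    ∀ (acc : List (Int × Int)) (c : Int),
    (tokens.foldl
      (fun (st : List (Int × Int) × Int) t =>
        (st.1 ++ [(st.2, st.2 + (t.toList.length : Int))], st.2 + (t.toList.length : Int)))
      (acc, c)).1 = acc ++ offsOf c tokens := by
  induction tokens with
  | nil => intro acc c; simp [offsOf]
  | cons t ts ih => intro acc c; simp only [List.foldl_cons, offsOf]; rw [ih]; simp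

theorem foldl_A_second (offs : List (Int × Int)) (labels : List Int) :
    ∀ (acc : List Int),
    offs.foldl
      (fun acc offset =>
        let acc2 := acc ++ [(0 : Int)]
        let items : PySem.Set Int :=
          PySem.Set.ofList (PySem.List.slice labels (some offset.1) (some offset.2))
        if (1 : Int) ∈ items then acc2.dropLast ++ [(1 : Int)] else acc2)
      acc
    = acc ++ offs.map (fun offset =>
        if (1 : Int) ∈ PySem.Set.ofList
            (PySem.List.slice labels (some offset.1) (some offset.2))
          then (1 : Int) else 0) := by
  induction offs with
  | nil => intro acc; simp
  | cons o os ih =>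
    intro acc
    simp only [List.foldl_cons, List.map_cons]
    rw [ih]
    by_cases h : (1 : Int) ∈ PySem.Set.ofList
        (PySem.List.slice labels (some o.1) (some o.2)) <;> simp [h]

-- B's per-token outputs starting at position pos
def bout (pref : List Int) (L : Nat) : Nat → List String → List Int
  | _, [] => []
  | pos, t :: ts =>
    (if pref.getD (min (pos + t.toList.length) L) 0 - pref.getD (min pos L) 0 > 0
      then (1 : Int) else 0) :: bout pref L (pos + t.toList.length) ts

theorem foldl_B (tokens : List String) (pref : List Int) (L : Nat) :
    ∀ (acc : List Int) (pos : Nat),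
    (tokens.foldl
      (fun (st : List Int × Nat) t =>
        (st.1 ++ [if pref.getD (min (st.2 + t.toList.length) L) 0
              - pref.getD (min st.2 L) 0 > 0 then (1 : Int) else 0],
          st.2 + t.toList.length))
      (acc, pos)).1
    = acc ++ bout pref L pos tokens := by
  induction tokens with
  | nil => intro acc pos; simp [bout]
  | cons t ts ih => intro acc pos; simp only [List.foldl_cons, bout]; rw [ih]; simp

theorem maps_agree (labels : List Int) (tokens : List String) :
    ∀ (pos : Nat),
    (offsOf (pos : Int) tokens).map (fun offset =>
        if (1 : Int) ∈ PySem.Set.ofList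
            (PySem.List.slice labels (some offset.1) (some offset.2))
          then (1 : Int) else 0)
    = bout (labels.foldl (fun p x => p ++ [p.getLastD 0 + (if x = 1 then 1 else 0)]) [0])
        labels.length pos tokens := by
  induction tokens with
  | nil => intro pos; simp [offsOf, bout]
  | cons t ts ih =>
    intro pos
    simp only [offsOf, List.map_cons, bout]
    rw [pointwise labels pos t.toList.length]
    rw [pref_getD labels (pos + t.toList.length), pref_getD labels pos]
    have : ((pos : Int) + (t.toList.length : Int)) = ((pos + t.toList.length : Nat) : Int) := by
      push_cast; ring
    rw [this, ih (pos + t.toList.length)]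

-- ===== VERDICT (by name: the statement is the Claim_ definition above) =====
theorem get_aggregated_label_spec : Claim_equal_get_aggregated_label := by
  intro tokens labels _
  unfold Spec_get_aggregated_label get_aggregated_label get_aggregated_label_alt
  simp only []
  rw [foldl_offsets tokens [] 0,
    foldl_B tokens
      (labels.foldl (fun p x => p ++ [p.getLastD 0 + (if x = 1 then 1 else 0)]) [0])
      labels.length [] 0,
    foldl_A_second]
  have hm := maps_agree labels tokens 0
  rw [Nat.cast_zero] at hm
  simp only [List.nil_append]
  exact hm
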